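-- pv_equiv track=rewrite | github.com/wherby/code | contest/00000c490d177/c494/q3/t3 copy 4.py | minRemovals
-- ===== SOURCE A (Python) =====
-- from typing import List, Tuple, Optional
--
-- def minRemovals(nums: List[int], target: int) -> int:
--     max_val = 0
--     for a in nums:
--         max_val |= a
--     size = (1 << (max_val.bit_length() + 1)) if max_val > 0 else 1
--
--     dp = [-1] * size
--     dp[0] = 0
--
--     for a in nums:
--         ndp = dp[:]
--         for i in range(size):
--             if dp[i] >= 0:
--                 nxt = i ^ a
--                 if nxt < size:
--                     ndp[nxt] = max(ndp[nxt], dp[i] + 1)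
--         dp = ndp
--
--     if target < size and dp[target] >= 0:
--         return len(nums) - dp[target]
--     return -1
-- ===== SOURCE B (Python) =====
-- from typing import List
--
--
-- def _table(arr):
--     # dict: subset-xor value -> maximum subset size achieving it
--     d = {0: 0}
--     for a in arr:
--         nd = dict(d)
--         for x, c in d.items():
--             y = x ^ a
--             if nd.get(y, -1) < c + 1:
--                 nd[y] = c + 1
--         d = nd
--     return d
--
--
-- def minRemovals(nums: List[int], target: int) -> int:
--     half = len(nums) // 2
--     dl = _table(nums[:half])
--     dr = _table(nums[half:])
--     best = -1
--     for x, c in dl.items():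
--         c2 = dr.get(target ^ x)
--         if c2 is not None and c + c2 > best:
--             best = c + c2
--     return len(nums) - best if best >= 0 else -1
-- ===== Notes on version B (the rewrite author's own statement) =====
-- stated objective: faster
-- what changed: Replaced A's dense DP over an array of 2^(bit_length(OR)+1) xor values (copied and fully rescanned for every element) by meet-in-the-middle: each half of nums is folded into a dict mapping subset-xor -> max subset size, and the two dicts are combined by looking up target ^ x.
-- outside the precondition, e.g. on minRemovals([1], -3): A returns 0, B returns -1; on minRemovals([-1], 0): A returns 0, B returns 1
import Mathlib
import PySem

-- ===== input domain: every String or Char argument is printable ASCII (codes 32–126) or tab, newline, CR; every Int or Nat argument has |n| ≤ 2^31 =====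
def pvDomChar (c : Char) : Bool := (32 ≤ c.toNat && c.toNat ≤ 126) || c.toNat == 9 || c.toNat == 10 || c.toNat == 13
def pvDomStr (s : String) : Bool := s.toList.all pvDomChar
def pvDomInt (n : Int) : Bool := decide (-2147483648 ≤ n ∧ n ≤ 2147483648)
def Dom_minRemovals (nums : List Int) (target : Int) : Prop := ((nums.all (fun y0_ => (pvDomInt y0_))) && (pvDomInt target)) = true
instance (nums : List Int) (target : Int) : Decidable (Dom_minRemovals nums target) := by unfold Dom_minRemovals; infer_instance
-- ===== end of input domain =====

-- B replaces A's dense DP over an array of size 2^(bit_length+1) by meet-in-the-middle: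
-- subset-xor dictionaries for the two halves of nums, combined by looking up target ^ x.


-- ===== PORT A =====
def minRemovals (nums : List Int) (target : Int) : Int :=
  let max_val : Int := nums.foldl (fun m a => PySem.Int.bor m a) 0
  let size : Int := if max_val > 0 then (1 : Int) <<< (PySem.Int.bitLength max_val + 1) else 1
  let dp0 : List Int := (List.replicate size.toNat (-1 : Int)).set 0 0
  let dp : List Int := nums.foldl (fun dp a =>
    (PySem.List.pyRange 0 size 1).foldl (fun ndp i =>
      if 0 ≤ PySem.List.pyGetD dp i (-1) then
        let nxt := PySem.Int.bxor i a
        if nxt < size then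
          PySem.List.pySetD ndp nxt
            (max (PySem.List.pyGetD ndp nxt (-1)) (PySem.List.pyGetD dp i (-1) + 1))
        else ndp
      else ndp) dp) dp0
  if target < size ∧ 0 ≤ PySem.List.pyGetD dp target (-1) then
    (nums.length : Int) - PySem.List.pyGetD dp target (-1)
  else -1

-- ===== PORT B =====
-- dict: subset-xor value -> maximum subset size achieving it
def minRemovalsTable (arr : List Int) : PySem.Dict Int Int :=
  arr.foldl (fun d a =>
    d.items.foldl (fun nd p =>
      let y := PySem.Int.bxor p.1 a
      if nd.getD y (-1) < p.2 + 1 then nd.insert y (p.2 + 1) else nd) d)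
    (PySem.Dict.ofList [((0 : Int), (0 : Int))])

def minRemovals_alt (nums : List Int) (target : Int) : Int :=
  let half : Int := PySem.Int.floordiv (nums.length : Int) 2
  let dl := minRemovalsTable (PySem.List.slice nums none (some half))
  let dr := minRemovalsTable (PySem.List.slice nums (some half) none)
  let best : Int := dl.items.foldl (fun best p =>
    match dr.get? (PySem.Int.bxor target p.1) with
    | some c2 => if best < p.2 + c2 then p.2 + c2 else best
    | none => best) (-1)
  if 0 ≤ best then (nums.length : Int) - best else -1

-- ===== PRECONDITION & SPEC =====
-- Pre_ restricts to the natural domain of the task (non-negative values and target);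
-- outside it A indexes dp through Python's negative-index wraparound, raising
-- IndexError or returning accidental wraparound values.
def Pre_minRemovals (nums : List Int) (target : Int) : Prop :=
  (∀ a ∈ nums, 0 ≤ a) ∧ 0 ≤ target
instance (nums : List Int) (target : Int) : Decidable (Pre_minRemovals nums target) := by
  unfold Pre_minRemovals; infer_instance

def pvWitness_minRemovals : List Int × Int := ([1, 2, 3], 3)

def Spec_minRemovals (nums : List Int) (target : Int) (out : Int) : Prop := out = minRemovals_alt nums target
instance (nums : List Int) (target : Int) (out : Int) : Decidable (Spec_minRemovals nums target out) := by unfold Spec_minRemovals; infer_instance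

-- ===== CLAIM (what is proved, stated in full; the proofs are below) =====
def Claim_equal_minRemovals : Prop := ∀ (nums : List Int) (target : Int), Dom_minRemovals nums target → Pre_minRemovals nums target → Spec_minRemovals nums target (minRemovals nums target)

-- ===== LEMMAS AND PROOFS =====

-- The common functional spec: maximum size of a sub-multiset of l with xor x (-1 if none),
-- as a left fold matching both programs' processing order.
def stepF (f : Nat → Int) (a : Nat) : Nat → Int := fun x =>
  if 0 ≤ f (x ^^^ a) then max (f x) (f (x ^^^ a) + 1) else f x

def baseF : Nat → Int := fun x => if x = 0 then 0 else -1

def FFn (l : List Nat) : Nat → Int := l.foldl stepF baseF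

-- r is the maximum of f x + g (t ^^^ x) over all x where both sides are ≥ 0, or -1 if none.
def IsComb (f g : Nat → Int) (t : Nat) (r : Int) : Prop :=
  (∀ x, 0 ≤ f x → 0 ≤ g (t ^^^ x) → f x + g (t ^^^ x) ≤ r) ∧
  (r = -1 ∨ ∃ x, 0 ≤ f x ∧ 0 ≤ g (t ^^^ x) ∧ r = f x + g (t ^^^ x))

lemma isComb_unique {f g : Nat → Int} {t : Nat} {r r' : Int}
    (h : IsComb f g t r) (h' : IsComb f g t r') : r = r' := by
  obtain ⟨hub, hex⟩ := h
  obtain ⟨hub', hex'⟩ := h'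
  rcases hex with rfl | ⟨x, hx1, hx2, rfl⟩ <;>
    rcases hex' with rfl | ⟨x', hx1', hx2', rfl⟩
  · rfl
  · have := hub x' hx1' hx2'; omega
  · have := hub' x hx1 hx2; omega
  · have := hub x' hx1' hx2'; have := hub' x hx1 hx2; omega

lemma xor_rot (x a b : Nat) : x ^^^ b ^^^ a = x ^^^ a ^^^ b := by
  rw [Nat.xor_assoc, Nat.xor_assoc, Nat.xor_comm b a]

lemma stepF_comm (f : Nat → Int) (a b : Nat) : stepF (stepF f a) b = stepF (stepF f b) a := by
  funext x
  simp only [stepF]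
  rw [show x ^^^ b ^^^ a = x ^^^ a ^^^ b from xor_rot x a b]
  simp only [max_def]
  split_ifs <;> omega

lemma foldl_stepF_comm (l : List Nat) (f : Nat → Int) (a : Nat) :
    List.foldl stepF (stepF f a) l = stepF (List.foldl stepF f l) a := by
  induction l generalizing f with
  | nil => rfl
  | cons b l ih => simp only [List.foldl_cons, stepF_comm f a b, ih]

lemma stepF_ge (f : Nat → Int) (a : Nat) (hf : ∀ y, -1 ≤ f y) : ∀ y, -1 ≤ stepF f a y := by
  intro y
  unfold stepF
  have := hf y; have := hf (y ^^^ a)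
  split <;> omega

lemma foldl_stepF_ge (l : List Nat) (f : Nat → Int) (hf : ∀ y, -1 ≤ f y) :
    ∀ y, -1 ≤ List.foldl stepF f l y := by
  induction l generalizing f with
  | nil => exact hf
  | cons a l ih => exact ih _ (stepF_ge f a hf)

lemma FFn_ge (l : List Nat) : ∀ y, -1 ≤ FFn l y := by
  refine foldl_stepF_ge l baseF (fun y => ?_)
  unfold baseF; split <;> omega

lemma stepF_le (f : Nat → Int) (a x : Nat) : f x ≤ stepF f a x := by
  unfold stepF; split
  · exact le_max_left _ _
  · exact le_rfl

lemma stepF_xor_ge (f : Nat → Int) (a x : Nat) (hx : 0 ≤ f x) :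
    f x + 1 ≤ stepF f a (x ^^^ a) := by
  unfold stepF
  rw [Nat.xor_xor_cancel_right]
  rw [if_pos hx]
  exact le_trans (le_max_right _ _) (le_rfl)

lemma FFn_cons (a : Nat) (l : List Nat) : FFn (a :: l) = stepF (FFn l) a := by
  unfold FFn
  simpa using foldl_stepF_comm l baseF a

-- transfer: consuming a on the left of a combination = consuming it on the right
lemma isComb_transfer {f g : Nat → Int} {t : Nat} {r : Int} (a : Nat)
    (h : IsComb (stepF f a) g t r) : IsComb f (stepF g a) t r := by
  obtain ⟨hub, hex⟩ := h
  have key1 : ∀ x, t ^^^ x ^^^ a ^^^ a = t ^^^ x := fun x => Nat.xor_xor_cancel_right _ _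
  have key2 : ∀ x, t ^^^ (x ^^^ a) = t ^^^ x ^^^ a := fun x => (Nat.xor_assoc t x a).symm
  have hub' : ∀ x, 0 ≤ f x → 0 ≤ stepF g a (t ^^^ x) → f x + stepF g a (t ^^^ x) ≤ r := by
    intro x hfx hgx
    have hFx : 0 ≤ stepF f a x := le_trans hfx (stepF_le f a x)
    by_cases hga : 0 ≤ g (t ^^^ x ^^^ a)
    · have hs : stepF g a (t ^^^ x) = max (g (t ^^^ x)) (g (t ^^^ x ^^^ a) + 1) := by
        unfold stepF; rw [if_pos hga]
      rw [hs] at hgx ⊢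
      rcases max_choice (g (t ^^^ x)) (g (t ^^^ x ^^^ a) + 1) with hmax | hmax
      · rw [hmax] at hgx ⊢
        have := hub x hFx hgx
        have := stepF_le f a x
        omega
      · rw [hmax]
        have hF' : f x + 1 ≤ stepF f a (x ^^^ a) := stepF_xor_ge f a x hfx
        have hg' : 0 ≤ g (t ^^^ (x ^^^ a)) := by rw [key2]; exact hga
        have := hub (x ^^^ a) (by omega) hg'
        rw [key2] at this
        omega
    · have hs : stepF g a (t ^^^ x) = g (t ^^^ x) := by
        unfold stepF; rw [if_neg hga]
      rw [hs] at hgx ⊢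
      have := hub x hFx hgx
      have := stepF_le f a x
      omega
  refine ⟨hub', ?_⟩
  rcases hex with rfl | ⟨x, hFx, hgx, hr⟩
  · left; rfl
  · right
    by_cases hfa : 0 ≤ f (x ^^^ a)
    · have hFeq : stepF f a x = max (f x) (f (x ^^^ a) + 1) := by
        unfold stepF; rw [if_pos hfa]
      rcases max_choice (f x) (f (x ^^^ a) + 1) with hmax | hmax
      · -- value comes from f x
        have hfx : 0 ≤ f x := by rw [hFeq, hmax] at hFx; exact hFx
        refine ⟨x, hfx, le_trans hgx (stepF_le g a _), ?_⟩
        have h1 : f x + g (t ^^^ x) ≤ f x + stepF g a (t ^^^ x) := by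
          have := stepF_le g a (t ^^^ x); omega
        have h2 := hub' x hfx (le_trans hgx (stepF_le g a _))
        rw [hFeq, hmax] at hr
        omega
      · -- value comes from f (x ^^^ a) + 1
        have hsg : stepF g a (t ^^^ (x ^^^ a)) = max (g (t ^^^ x ^^^ a)) (g (t ^^^ x) + 1) := by
          rw [key2]; unfold stepF; rw [key1, if_pos hgx]
        have hmr := le_max_right (g (t ^^^ x ^^^ a)) (g (t ^^^ x) + 1)
        have hge : 0 ≤ stepF g a (t ^^^ (x ^^^ a)) := by rw [hsg]; omega
        refine ⟨x ^^^ a, hfa, hge, ?_⟩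
        have h2 := hub' (x ^^^ a) hfa hge
        rw [hFeq, hmax] at hr
        rw [hsg] at h2 ⊢
        omega
    · have hFeq : stepF f a x = f x := by unfold stepF; rw [if_neg hfa]
      have hfx : 0 ≤ f x := by rw [hFeq] at hFx; exact hFx
      refine ⟨x, hfx, le_trans hgx (stepF_le g a _), ?_⟩
      have h2 := hub' x hfx (le_trans hgx (stepF_le g a _))
      have := stepF_le g a (t ^^^ x)
      rw [hFeq] at hr
      omega

lemma isComb_foldl (l : List Nat) (f : Nat → Int) (t : Nat) (hf : ∀ y, -1 ≤ f y) :
    IsComb f (FFn l) t (List.foldl stepF f l t) := by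
  induction l generalizing f with
  | nil =>
    constructor
    · intro x hfx hbx
      unfold FFn baseF at hbx ⊢
      simp only [List.foldl_nil] at hbx ⊢
      by_cases hx : t ^^^ x = 0
      · have : x = t := by
          have := Nat.xor_eq_zero_iff.mp hx; omega
        subst this
        rw [if_pos hx]
        have := stepF_le  -- placeholder to keep structure; not needed
        omega
      · rw [if_neg hx] at hbx; omega
    · by_cases hft : 0 ≤ f t
      · right
        refine ⟨t, hft, ?_, ?_⟩ <;>
          simp [FFn, baseF, Nat.xor_self]
      · left
        have := hf t
        simp only [List.foldl_nil]
        omega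
  | cons a l ih =>
    simp only [List.foldl_cons]
    have h1 := ih (stepF f a) (stepF_ge f a hf)
    have h2 := isComb_transfer a h1
    rwa [← FFn_cons] at h2

lemma foldl_stepF_support {K : Nat} (l : List Nat) (f : Nat → Int)
    (hl : ∀ a ∈ l, a < 2 ^ K) (hf : ∀ x, 0 ≤ f x → x < 2 ^ K) :
    ∀ x, 0 ≤ List.foldl stepF f l x → x < 2 ^ K := by
  induction l generalizing f with
  | nil => exact hf
  | cons a l ih =>
    refine ih (stepF f a) (fun b hb => hl b (List.mem_cons_of_mem a hb)) ?_
    intro x hx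
    unfold stepF at hx
    split at hx
    · rename_i hg
      have h1 : x ^^^ a < 2 ^ K := hf _ hg
      have h2 : a < 2 ^ K := hl a List.mem_cons_self
      have := Nat.xor_lt_two_pow h1 h2
      rwa [Nat.xor_xor_cancel_right] at this
    · exact hf x hx

-- support of FFn is below 2 ^ K when all elements are
lemma FFn_support {K : Nat} {l : List Nat} (hl : ∀ a ∈ l, a < 2 ^ K) :
    ∀ x, 0 ≤ FFn l x → x < 2 ^ K := by
  refine foldl_stepF_support l baseF hl ?_
  intro x hx
  unfold baseF at hx
  split at hx
  · rename_i h; rw [h]; exact Nat.two_pow_pos K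
  · omega


-- ---- small list/getD helpers ----
lemma getD_set_self {l : List Int} {j : Nat} (v : Int) (h : j < l.length) :
    (l.set j v).getD j (-1) = v := by
  simp [List.getD, h]

lemma getD_set_ne {l : List Int} {i j : Nat} (v : Int) (h : i ≠ j) :
    (l.set i v).getD j (-1) = l.getD j (-1) := by
  simp [List.getD, h]

lemma le_foldl_or (l : List Nat) (m : Nat) : m ≤ l.foldl (· ||| ·) m := by
  induction l generalizing m with
  | nil => exact le_rfl
  | cons a l ih => exact le_trans Nat.left_le_or (ih (m ||| a))

lemma mem_le_foldl_or {l : List Nat} {x : Nat} (hx : x ∈ l) (m : Nat) :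
    x ≤ l.foldl (· ||| ·) m := by
  induction l generalizing m with
  | nil => cases hx
  | cons a l ih =>
    rcases List.mem_cons.mp hx with rfl | hx'
    · exact le_trans (by rw [Nat.or_comm]; exact Nat.left_le_or) (le_foldl_or l (m ||| x))
    · exact ih hx' (m ||| a)

-- ---- Int bitwise facts ----
lemma bor_foldl_natCast (l : List Int) (m : Nat) (h : ∀ a ∈ l, 0 ≤ a) :
    l.foldl (fun m a => PySem.Int.bor m a) (m : Int) =
      (((l.map Int.toNat).foldl (· ||| ·) m : Nat) : Int) := by
  induction l generalizing m with
  | nil => rfl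
  | cons a l ih =>
    have ha : 0 ≤ a := h a List.mem_cons_self
    simp only [List.foldl_cons, List.map_cons]
    rw [PySem.Int.bor_of_nonneg (by positivity) ha, Int.toNat_natCast]
    exact ih _ (fun b hb => h b (List.mem_cons_of_mem a hb))

lemma bxor_neg_left {k a : Int} (hk : k < 0) (ha : 0 ≤ a) : PySem.Int.bxor k a < 0 := by
  unfold PySem.Int.bxor
  rw [if_neg (by omega), if_pos ha]
  have : (0 : Int) ≤ ((-k - 1).toNat ^^^ a.toNat : Nat) := by positivity
  omega

lemma bxor_nonneg {k a : Int} (hk : 0 ≤ k) (ha : 0 ≤ a) : 0 ≤ PySem.Int.bxor k a := by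
  rw [PySem.Int.bxor_of_nonneg hk ha]; positivity

lemma bxor_bxor_cancel (k a : Int) (ha : 0 ≤ a) :
    PySem.Int.bxor (PySem.Int.bxor k a) a = k := by
  rcases (by omega : 0 ≤ k ∨ k < 0) with hk | hk
  · rw [PySem.Int.bxor_of_nonneg hk ha,
      PySem.Int.bxor_of_nonneg (by positivity) ha, Int.toNat_natCast,
      Nat.xor_xor_cancel_right]
    omega
  · unfold PySem.Int.bxor
    rw [if_neg (by omega), if_pos ha]
    have h1 : (0 : Int) ≤ ((-k - 1).toNat ^^^ a.toNat : Nat) := by positivity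
    rw [if_neg (by omega), if_pos ha]
    have h2 : (-(-((-k - 1).toNat ^^^ a.toNat : Nat) - 1) - 1) = (((-k - 1).toNat ^^^ a.toNat : Nat) : Int) := by ring
    rw [h2, Int.toNat_natCast, Nat.xor_xor_cancel_right]
    omega

lemma bxor_toNat {k a : Int} (hk : 0 ≤ k) (ha : 0 ≤ a) :
    (PySem.Int.bxor k a).toNat = k.toNat ^^^ a.toNat := by
  rw [PySem.Int.bxor_of_nonneg hk ha, Int.toNat_natCast]

-- ---- A side: the inner loop is a parallel update through the involution (· ^^^ aN) ----
lemma parUpd (f : Nat → Int) (aN s : Nat) :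
    ∀ (l : List Nat) (ndp : List Int), l.Nodup → ndp.length = s →
      (let res := l.foldl (fun ndp k =>
          if 0 ≤ f k then
            (if k ^^^ aN < s then
              ndp.set (k ^^^ aN) (max (ndp.getD (k ^^^ aN) (-1)) (f k + 1))
            else ndp)
          else ndp) ndp
       res.length = s ∧ ∀ j,
         res.getD j (-1) =
           if (j ^^^ aN) ∈ l ∧ 0 ≤ f (j ^^^ aN) ∧ j < s then
             max (ndp.getD j (-1)) (f (j ^^^ aN) + 1)
           else ndp.getD j (-1)) := by
  intro l
  induction l with
  | nil => intro ndp _ hlen; exact ⟨hlen, fun j => by simp⟩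
  | cons k0 l ih =>
    intro ndp hnd hlen
    have hk0l : k0 ∉ l := (List.nodup_cons.mp hnd).1
    have hndl : l.Nodup := (List.nodup_cons.mp hnd).2
    set ndp' := (if 0 ≤ f k0 then
        (if k0 ^^^ aN < s then
          ndp.set (k0 ^^^ aN) (max (ndp.getD (k0 ^^^ aN) (-1)) (f k0 + 1))
        else ndp)
      else ndp) with hndp'
    have hlen' : ndp'.length = s := by
      rw [hndp']; split_ifs <;> simp [hlen]
    obtain ⟨hrl, hr⟩ := ih ndp' hndl hlen'
    refine ⟨hrl, fun j => ?_⟩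
    rw [List.foldl_cons]
    rw [← hndp']
    rw [hr j]
    by_cases hj : j ^^^ aN = k0
    · have hjmem : (j ^^^ aN) ∉ l := by rw [hj]; exact hk0l
      rw [if_neg (by tauto)]
      have hk0j : k0 ^^^ aN = j := by rw [← hj, Nat.xor_xor_cancel_right]
      by_cases hf0 : 0 ≤ f k0
      · by_cases hjs : j < s
        · rw [if_pos ⟨by rw [hj]; exact List.mem_cons_self, by rw [hj]; exact hf0, hjs⟩]
          rw [hndp', if_pos hf0, if_pos (by rw [hk0j]; exact hjs), hk0j, hj]
          exact getD_set_self _ (by rw [hlen]; exact hjs)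
        · rw [if_neg (by tauto)]
          rw [hndp', if_pos hf0, if_neg (by rw [hk0j]; exact hjs)]
      · rw [if_neg (by rw [hj]; tauto)]
        rw [hndp', if_neg hf0]
    · have hne : ndp'.getD j (-1) = ndp.getD j (-1) := by
        rw [hndp']
        split_ifs with h1 h2
        · refine getD_set_ne _ (fun hc => hj ?_)
          rw [← hc, Nat.xor_xor_cancel_right]
        · rfl
        · rfl
      rw [hne]
      by_cases hmem : (j ^^^ aN) ∈ l ∧ 0 ≤ f (j ^^^ aN) ∧ j < s
      · rw [if_pos hmem, if_pos ⟨List.mem_cons_of_mem _ hmem.1, hmem.2⟩]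
      · rw [if_neg hmem, if_neg (fun hc => hmem ⟨(List.mem_cons.mp hc.1).resolve_left hj, hc.2⟩)]


-- the inner loop of port A, with the size already evaluated to 2 ^ K
def innerFoldA (K : Nat) (dp : List Int) (a : Int) : List Int :=
  (PySem.List.pyRange 0 ((2 ^ K : Nat) : Int) 1).foldl (fun ndp i =>
    if 0 ≤ PySem.List.pyGetD dp i (-1) then
      let nxt := PySem.Int.bxor i a
      if nxt < ((2 ^ K : Nat) : Int) then
        PySem.List.pySetD ndp nxt
          (max (PySem.List.pyGetD ndp nxt (-1)) (PySem.List.pyGetD dp i (-1) + 1))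
      else ndp
    else ndp) dp

lemma innerA (K : Nat) (dp : List Int) (f : Nat → Int) (a : Int) (ha : 0 ≤ a)
    (haK : a.toNat < 2 ^ K) (hlen : dp.length = 2 ^ K)
    (hval : ∀ k < 2 ^ K, dp.getD k (-1) = f k) :
    (innerFoldA K dp a).length = 2 ^ K ∧
      ∀ k < 2 ^ K, (innerFoldA K dp a).getD k (-1) = stepF f a.toNat k := by
  have hbody : innerFoldA K dp a =
      (List.range (2 ^ K)).foldl (fun ndp k =>
        if 0 ≤ f k then
          (if k ^^^ a.toNat < 2 ^ K then
            ndp.set (k ^^^ a.toNat) (max (ndp.getD (k ^^^ a.toNat) (-1)) (f k + 1))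
          else ndp)
        else ndp) dp := by
    unfold innerFoldA
    rw [PySem.List.pyRange_one]
    simp only [Int.sub_zero, Int.toNat_natCast, zero_add]
    rw [List.foldl_map]
    refine PySem.List.foldl_congr_mem _ _ _ dp ?_
    intro acc k hk
    rw [List.mem_range] at hk
    have hac : a = ((a.toNat : Nat) : Int) := (Int.toNat_of_nonneg ha).symm
    rw [hac]
    simp only [PySem.List.pyGetD_natCast, PySem.Int.bxor_natCast,
      PySem.List.pySetD_natCast, Nat.cast_lt, Int.toNat_natCast, hval k hk]
  rw [hbody]
  obtain ⟨hl, hv⟩ := parUpd f a.toNat (2 ^ K) (List.range (2 ^ K)) dp (List.nodup_range) hlen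
  refine ⟨hl, fun k hk => ?_⟩
  rw [hv k]
  have hmem : (k ^^^ a.toNat) ∈ List.range (2 ^ K) :=
    List.mem_range.mpr (Nat.xor_lt_two_pow hk haK)
  unfold stepF
  by_cases hf : 0 ≤ f (k ^^^ a.toNat)
  · rw [if_pos ⟨hmem, hf, hk⟩, if_pos hf, hval k hk]
  · rw [if_neg (by tauto), if_neg hf, hval k hk]

lemma outerA (K : Nat) (l : List Int) :
    ∀ (dp : List Int) (f : Nat → Int),
      (∀ a ∈ l, 0 ≤ a ∧ a.toNat < 2 ^ K) → dp.length = 2 ^ K →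
      (∀ k < 2 ^ K, dp.getD k (-1) = f k) →
      (l.foldl (fun dp a => innerFoldA K dp a) dp).length = 2 ^ K ∧
        ∀ k < 2 ^ K, (l.foldl (fun dp a => innerFoldA K dp a) dp).getD k (-1) =
          List.foldl stepF f (l.map Int.toNat) k := by
  induction l with
  | nil => intro dp f _ hlen hval; exact ⟨hlen, fun k hk => hval k hk⟩
  | cons a l ih =>
    intro dp f hall hlen hval
    have ha := hall a List.mem_cons_self
    obtain ⟨hl, hv⟩ := innerA K dp f a ha.1 ha.2 hlen hval
    simpa using ih (innerFoldA K dp a) (stepF f a.toNat)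
      (fun b hb => hall b (List.mem_cons_of_mem a hb)) hl hv

lemma dp0_spec (K : Nat) :
    ((List.replicate (2 ^ K) (-1 : Int)).set 0 0).length = 2 ^ K ∧
      ∀ k < 2 ^ K, ((List.replicate (2 ^ K) (-1 : Int)).set 0 0).getD k (-1) = baseF k := by
  constructor
  · simp
  · intro k hk
    unfold baseF
    by_cases h0 : k = 0
    · subst h0
      rw [if_pos rfl]
      exact getD_set_self _ (by simp)
    · rw [if_neg h0, getD_set_ne _ (fun h => h0 h.symm)]
      simp [List.getD, hk]

lemma A_eval (nums : List Int) (target : Int) (h1 : ∀ a ∈ nums, 0 ≤ a) (h2 : 0 ≤ target) :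
    minRemovals nums target =
      if 0 ≤ FFn (nums.map Int.toNat) target.toNat then
        (nums.length : Int) - FFn (nums.map Int.toNat) target.toNat
      else -1 := by
  obtain ⟨tN, rfl⟩ : ∃ tN : Nat, target = (tN : Int) :=
    ⟨target.toNat, (Int.toNat_of_nonneg h2).symm⟩
  simp only [Int.toNat_natCast]
  have hMN : nums.foldl (fun m a => PySem.Int.bor m a) 0 =
      (((nums.map Int.toNat).foldl (· ||| ·) 0 : Nat) : Int) := by
    simpa using bor_foldl_natCast nums 0 h1
  set MN := (nums.map Int.toNat).foldl (· ||| ·) 0 with hMNdef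
  set K : Nat := if 0 < MN then PySem.Int.bitLength ((MN : Nat) : Int) + 1 else 0 with hKdef
  -- every element is < 2 ^ K
  have hbound : ∀ a ∈ nums, 0 ≤ a ∧ a.toNat < 2 ^ K := by
    intro a hamem
    refine ⟨h1 a hamem, ?_⟩
    have hle : a.toNat ≤ MN :=
      mem_le_foldl_or (List.mem_map_of_mem hamem) 0
    by_cases hM : 0 < MN
    · rw [hKdef, if_pos hM]
      have hlt : MN < 2 ^ PySem.Int.bitLength ((MN : Nat) : Int) := by
        have := PySem.Int.lt_two_pow_bitLength ((MN : Nat) : Int)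
        simpa using this
      calc a.toNat ≤ MN := hle
        _ < 2 ^ PySem.Int.bitLength ((MN : Nat) : Int) := hlt
        _ ≤ 2 ^ (PySem.Int.bitLength ((MN : Nat) : Int) + 1) :=
            Nat.pow_le_pow_right (by norm_num) (Nat.le_succ _)
    · rw [hKdef, if_neg hM]
      have h0 : a.toNat = 0 := by omega
      simp [h0]
  -- the computed size is 2 ^ K
  have hsize : (if nums.foldl (fun m a => PySem.Int.bor m a) 0 > 0 then
      (1 : Int) <<< (PySem.Int.bitLength (nums.foldl (fun m a => PySem.Int.bor m a) 0) + 1)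
      else 1) = ((2 ^ K : Nat) : Int) := by
    rw [hMN]
    by_cases hM : 0 < MN
    · rw [if_pos (by exact_mod_cast hM), hKdef, if_pos hM]
      rw [Int.shiftLeft_eq]
      push_cast
      ring
    · have hM0 : MN = 0 := by omega
      rw [hKdef, if_neg hM, hM0]
      norm_num
  have hmapb : ∀ aN ∈ nums.map Int.toNat, aN < 2 ^ K := by
    intro aN haN
    obtain ⟨a, ha, rfl⟩ := List.mem_map.mp haN
    exact (hbound a ha).2
  simp only [minRemovals]
  rw [hsize]
  simp only [Int.toNat_natCast]
  have hfoldeq : (fun (dp : List Int) (a : Int) =>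
      (PySem.List.pyRange 0 ((2 ^ K : Nat) : Int) 1).foldl (fun ndp i =>
        if 0 ≤ PySem.List.pyGetD dp i (-1) then
          let nxt := PySem.Int.bxor i a
          if nxt < ((2 ^ K : Nat) : Int) then
            PySem.List.pySetD ndp nxt
              (max (PySem.List.pyGetD ndp nxt (-1)) (PySem.List.pyGetD dp i (-1) + 1))
          else ndp
        else ndp) dp) = fun dp a => innerFoldA K dp a := rfl
  rw [hfoldeq]
  obtain ⟨hd0l, hd0v⟩ := dp0_spec K
  obtain ⟨hlf, hvf⟩ := outerA K nums _ baseF hbound hd0l hd0v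
  rw [PySem.List.pyGetD_natCast]
  unfold FFn
  by_cases htN : tN < 2 ^ K
  · have hlt : ((tN : Nat) : Int) < ((2 ^ K : Nat) : Int) := by exact_mod_cast htN
    rw [hvf _ htN]
    by_cases hpos : 0 ≤ List.foldl stepF baseF (nums.map Int.toNat) tN
    · rw [if_pos ⟨hlt, hpos⟩, if_pos hpos]
    · rw [if_neg (by tauto), if_neg hpos]
  · have hnpos : ¬ 0 ≤ List.foldl stepF baseF (nums.map Int.toNat) tN :=
      fun h => htN (FFn_support hmapb _ h)
    rw [if_neg (fun hc => htN (by exact_mod_cast hc.1)), if_neg hnpos]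


-- ---- B side ----
-- the dictionary built by minRemovalsTable represents f on non-negative keys
def TblP (f : Nat → Int) (d : PySem.Dict Int Int) : Prop :=
  d.keys.Nodup ∧
    ∀ k : Int, d.get? k = if 0 ≤ k ∧ 0 ≤ f k.toNat then some (f k.toNat) else none

lemma dictUpd (a : Int) (ha : 0 ≤ a) (l : List (Int × Int)) :
    ∀ (nd : PySem.Dict Int Int), (l.map (·.1)).Nodup →
      (∀ p ∈ l, 0 ≤ p.1 ∧ 0 ≤ p.2) → nd.keys.Nodup →
      ((l.foldl (fun nd p =>
          if nd.getD (PySem.Int.bxor p.1 a) (-1) < p.2 + 1 then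
            nd.insert (PySem.Int.bxor p.1 a) (p.2 + 1) else nd) nd).keys.Nodup ∧
       ∀ k : Int,
         ((∀ c, (PySem.Int.bxor k a, c) ∉ l) →
            (l.foldl (fun nd p =>
              if nd.getD (PySem.Int.bxor p.1 a) (-1) < p.2 + 1 then
                nd.insert (PySem.Int.bxor p.1 a) (p.2 + 1) else nd) nd).get? k = nd.get? k) ∧
         (∀ c, (PySem.Int.bxor k a, c) ∈ l →
            (l.foldl (fun nd p =>
              if nd.getD (PySem.Int.bxor p.1 a) (-1) < p.2 + 1 then
                nd.insert (PySem.Int.bxor p.1 a) (p.2 + 1) else nd) nd).get? k =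
              some (max (nd.getD k (-1)) (c + 1)))) := by
  induction l with
  | nil => intro nd _ _ hnod; exact ⟨hnod, fun k => ⟨fun _ => rfl, fun c hc => absurd hc (List.not_mem_nil)⟩⟩
  | cons p l ih =>
    intro nd hnodl hvals hnod
    obtain ⟨x, c⟩ := p
    have hx : 0 ≤ x := (hvals (x, c) List.mem_cons_self).1
    have hc : 0 ≤ c := (hvals (x, c) List.mem_cons_self).2
    have hxl : x ∉ l.map (·.1) := by
      simpa using (List.nodup_cons.mp hnodl).1
    have hnodl' : (l.map (·.1)).Nodup := by
      simpa using (List.nodup_cons.mp hnodl).2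
    set y := PySem.Int.bxor x a with hy
    set nd' := (if nd.getD y (-1) < c + 1 then nd.insert y (c + 1) else nd) with hnd'
    have hnod' : nd'.keys.Nodup := by
      rw [hnd']; split_ifs
      · exact PySem.Dict.nodup_keys_insert _ _ _ hnod
      · exact hnod
    obtain ⟨hrn, hr⟩ := ih nd' hnodl' (fun q hq => hvals q (List.mem_cons_of_mem _ hq)) hnod'
    simp only [List.foldl_cons]
    rw [← hy, ← hnd']
    refine ⟨hrn, fun k => ?_⟩
    by_cases hxk : PySem.Int.bxor k a = x
    · have hky : y = k := by rw [hy, ← hxk, bxor_bxor_cancel k a ha]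
      have hnotl : ∀ c', (PySem.Int.bxor k a, c') ∉ l := by
        intro c' hc'
        exact hxl (by rw [← hxk]; exact List.mem_map_of_mem hc')
      have hfold := (hr k).1 hnotl
      constructor
      · intro h
        exact absurd (by rw [hxk]; exact List.mem_cons_self) (h c)
      · intro c' hc'
        rcases List.mem_cons.mp hc' with heq | htl
        · have hcc : c' = c := by
            have := (Prod.mk.injEq _ _ _ _).mp heq
            exact this.2
          subst hcc
          rw [hfold, hnd']
          split_ifs with hg
          · rw [← hky, PySem.Dict.get?_insert_self]
            have : nd.getD k (-1) < c' + 1 := by rw [← hky]; exact hg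
            exact congrArg some (max_eq_right (by omega)).symm
          · have hgD : ¬ nd.getD y (-1) < c' + 1 := hg
            rw [hky] at hgD
            rw [PySem.Dict.getD_eq_get?_getD] at hgD
            cases hopt : nd.get? k with
            | none => rw [hopt] at hgD; simp at hgD; omega
            | some v =>
              rw [hopt] at hgD
              simp only [Option.getD_some] at hgD
              rw [PySem.Dict.getD_eq_get?_getD, hopt]
              simp only [Option.getD_some]
              exact congrArg some (max_eq_left (by omega)).symm
        · exact absurd (List.mem_map_of_mem htl) (by rw [hxk] at *; exact hxl)
    · have hky : y ≠ k := by
        intro h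
        exact hxk (by rw [← h, hy, bxor_bxor_cancel x a ha])
      have hnd'k : nd'.get? k = nd.get? k := by
        rw [hnd']; split_ifs
        · exact PySem.Dict.get?_insert_of_ne _ _ (fun h => hky h.symm)
        · rfl
      constructor
      · intro h
        rw [(hr k).1 (fun c' hc' => h c' (List.mem_cons_of_mem _ hc')), hnd'k]
      · intro c' hc'
        rcases List.mem_cons.mp hc' with heq | htl
        · exact absurd ((Prod.mk.injEq _ _ _ _).mp heq).1 hxk
        · rw [(hr k).2 c' htl]
          congr 2
          rw [PySem.Dict.getD_eq_get?_getD, PySem.Dict.getD_eq_get?_getD, hnd'k]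

lemma baseF_ge : ∀ y, -1 ≤ baseF y := by
  intro y; unfold baseF; split <;> omega

lemma tblStep (f : Nat → Int) (hf : ∀ y, -1 ≤ f y) (d : PySem.Dict Int Int)
    (hd : TblP f d) (a : Int) (ha : 0 ≤ a) :
    TblP (stepF f a.toNat)
      (d.items.foldl (fun nd p =>
        if nd.getD (PySem.Int.bxor p.1 a) (-1) < p.2 + 1 then
          nd.insert (PySem.Int.bxor p.1 a) (p.2 + 1) else nd) d) := by
  obtain ⟨hnod, hget⟩ := hd
  have hkeys : d.items.map (·.1) = d.keys := rfl
  have hvals : ∀ p ∈ d.items, 0 ≤ p.1 ∧ 0 ≤ p.2 := by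
    intro p hp
    have h := PySem.Dict.get?_of_mem_items d hp hnod
    rw [hget p.1] at h
    split_ifs at h with hcond
    exact ⟨hcond.1, by injection h with h'; have := hcond.2; omega⟩
  obtain ⟨hrn, hr⟩ := dictUpd a ha d.items d (hkeys ▸ hnod) hvals hnod
  refine ⟨hrn, fun k => ?_⟩
  by_cases hk0 : 0 ≤ k
  · have hbx : 0 ≤ PySem.Int.bxor k a := bxor_nonneg hk0 ha
    have hbxt : (PySem.Int.bxor k a).toNat = k.toNat ^^^ a.toNat := bxor_toNat hk0 ha
    by_cases hmem : 0 ≤ f (k.toNat ^^^ a.toNat)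
    · have hgetbx : d.get? (PySem.Int.bxor k a) = some (f (k.toNat ^^^ a.toNat)) := by
        rw [hget, if_pos ⟨hbx, by rw [hbxt]; exact hmem⟩, hbxt]
      have hmemit := PySem.Dict.mem_items_of_get?_eq_some d hgetbx
      rw [(hr k).2 _ hmemit]
      have hstep : stepF f a.toNat k.toNat = max (f k.toNat) (f (k.toNat ^^^ a.toNat) + 1) := by
        unfold stepF; rw [if_pos hmem]
      have hDk : d.getD k (-1) = if 0 ≤ f k.toNat then f k.toNat else -1 := by
        rw [PySem.Dict.getD_eq_get?_getD, hget]
        by_cases hfk : 0 ≤ f k.toNat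
        · rw [if_pos ⟨hk0, hfk⟩, if_pos hfk, Option.getD_some]
        · rw [if_neg (fun h => hfk h.2), if_neg hfk, Option.getD_none]
      have h0s : 0 ≤ stepF f a.toNat k.toNat := by
        rw [hstep]
        have := le_max_right (f k.toNat) (f (k.toNat ^^^ a.toNat) + 1)
        omega
      rw [if_pos ⟨hk0, h0s⟩, hstep, hDk]
      by_cases hfk : 0 ≤ f k.toNat
      · rw [if_pos hfk]
      · rw [if_neg hfk]
        have hfe : f k.toNat = -1 := by have := hf k.toNat; omega
        rw [hfe]
    · have hnomem : ∀ c, (PySem.Int.bxor k a, c) ∉ d.items := by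
        intro c hcmem
        have h := PySem.Dict.get?_of_mem_items d hcmem hnod
        rw [hget, if_neg (fun hcond => hmem (by rw [← hbxt]; exact hcond.2))] at h
        cases h
      rw [(hr k).1 hnomem, hget]
      have hstep : stepF f a.toNat k.toNat = f k.toNat := by
        unfold stepF; rw [if_neg hmem]
      rw [hstep]
  · have hbx : PySem.Int.bxor k a < 0 := bxor_neg_left (by omega) ha
    have hnomem : ∀ c, (PySem.Int.bxor k a, c) ∉ d.items := by
      intro c hcmem
      have := (hvals _ hcmem).1
      omega
    rw [(hr k).1 hnomem, hget, if_neg (fun h => hk0 h.1), if_neg (fun h => hk0 h.1)]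


lemma tblP_base : TblP baseF (PySem.Dict.ofList [((0 : Int), (0 : Int))]) := by
  have hofl : PySem.Dict.ofList [((0 : Int), (0 : Int))] = PySem.Dict.empty.insert 0 0 := by decide
  constructor
  · rw [hofl]
    exact PySem.Dict.nodup_keys_insert _ _ _ (by decide)
  · intro k
    rw [hofl]
    by_cases hk : k = 0
    · subst hk
      rw [PySem.Dict.get?_insert_self]
      rw [if_pos ⟨le_refl 0, by unfold baseF; simp⟩]
      unfold baseF; simp
    · rw [PySem.Dict.get?_insert_of_ne _ _ hk, PySem.Dict.get?_empty]
      by_cases hk0 : 0 ≤ k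
      · have htn : k.toNat ≠ 0 := by omega
        rw [if_neg (fun h => by unfold baseF at h; rw [if_neg htn] at h; omega)]
      · rw [if_neg (fun h => hk0 h.1)]

lemma tblAux (l : List Int) :
    ∀ (d : PySem.Dict Int Int) (f : Nat → Int), (∀ a ∈ l, 0 ≤ a) → (∀ y, -1 ≤ f y) →
      TblP f d →
      TblP (List.foldl stepF f (l.map Int.toNat))
        (l.foldl (fun d a =>
          d.items.foldl (fun nd p =>
            let y := PySem.Int.bxor p.1 a
            if nd.getD y (-1) < p.2 + 1 then nd.insert y (p.2 + 1) else nd) d) d) := by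
  induction l with
  | nil => intro d f _ _ hd; exact hd
  | cons a l ih =>
    intro d f hl hf hd
    have ha : 0 ≤ a := hl a List.mem_cons_self
    simp only [List.foldl_cons, List.map_cons]
    exact ih _ (stepF f a.toNat) (fun b hb => hl b (List.mem_cons_of_mem a hb))
      (stepF_ge f a.toNat hf) (tblStep f hf d hd a ha)

lemma tblMain (arr : List Int) (h : ∀ a ∈ arr, 0 ≤ a) :
    TblP (FFn (arr.map Int.toNat)) (minRemovalsTable arr) :=
  tblAux arr _ baseF h baseF_ge tblP_base

lemma bestFold (dr : PySem.Dict Int Int) (target : Int) (l : List (Int × Int)) :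
    ∀ b0 : Int,
      b0 ≤ l.foldl (fun best p =>
          match dr.get? (PySem.Int.bxor target p.1) with
          | some c2 => if best < p.2 + c2 then p.2 + c2 else best
          | none => best) b0 ∧
      (∀ p ∈ l, ∀ c2, dr.get? (PySem.Int.bxor target p.1) = some c2 →
        p.2 + c2 ≤ l.foldl (fun best p =>
          match dr.get? (PySem.Int.bxor target p.1) with
          | some c2 => if best < p.2 + c2 then p.2 + c2 else best
          | none => best) b0) ∧
      (l.foldl (fun best p =>
          match dr.get? (PySem.Int.bxor target p.1) with
          | some c2 => if best < p.2 + c2 then p.2 + c2 else best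
          | none => best) b0 = b0 ∨
        ∃ p ∈ l, ∃ c2, dr.get? (PySem.Int.bxor target p.1) = some c2 ∧
          l.foldl (fun best p =>
            match dr.get? (PySem.Int.bxor target p.1) with
            | some c2 => if best < p.2 + c2 then p.2 + c2 else best
            | none => best) b0 = p.2 + c2) := by
  induction l with
  | nil => intro b0; exact ⟨le_rfl, fun p hp => absurd hp (List.not_mem_nil), Or.inl rfl⟩
  | cons p l ih =>
    intro b0
    simp only [List.foldl_cons]
    cases hopt : dr.get? (PySem.Int.bxor target p.1) with
    | none =>
      dsimp only
      obtain ⟨h1, h2, h3⟩ := ih b0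
      refine ⟨h1, fun q hq c2 hc2 => ?_, ?_⟩
      · rcases List.mem_cons.mp hq with rfl | hq'
        · rw [hopt] at hc2; cases hc2
        · exact h2 q hq' c2 hc2
      · rcases h3 with h | ⟨q, hq, c2, hc2, he⟩
        · exact Or.inl h
        · exact Or.inr ⟨q, List.mem_cons_of_mem _ hq, c2, hc2, he⟩
    | some c2 =>
      dsimp only
      set b1 := if b0 < p.2 + c2 then p.2 + c2 else b0 with hb1
      obtain ⟨h1, h2, h3⟩ := ih b1
      have hb01 : b0 ≤ b1 := by rw [hb1]; split_ifs <;> omega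
      have hpc : p.2 + c2 ≤ b1 := by rw [hb1]; split_ifs <;> omega
      refine ⟨le_trans hb01 h1, fun q hq c2' hc2' => ?_, ?_⟩
      · rcases List.mem_cons.mp hq with rfl | hq'
        · rw [hopt] at hc2'
          injection hc2' with hc2''
          subst hc2''
          exact le_trans hpc h1
        · exact h2 q hq' c2' hc2'
      · rcases h3 with h | ⟨q, hq, c2', hc2', he⟩
        · rw [h, hb1]
          split_ifs with hlt
          · exact Or.inr ⟨p, List.mem_cons_self, c2, hopt, rfl⟩
          · exact Or.inl rfl
        · exact Or.inr ⟨q, List.mem_cons_of_mem _ hq, c2', hc2', he⟩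

lemma B_eval (nums : List Int) (target : Int) (h1 : ∀ a ∈ nums, 0 ≤ a) (h2 : 0 ≤ target) :
    minRemovals_alt nums target =
      if 0 ≤ FFn (nums.map Int.toNat) target.toNat then
        (nums.length : Int) - FFn (nums.map Int.toNat) target.toNat
      else -1 := by
  obtain ⟨tN, rfl⟩ : ∃ tN : Nat, target = (tN : Int) :=
    ⟨target.toNat, (Int.toNat_of_nonneg h2).symm⟩
  simp only [Int.toNat_natCast]
  simp only [minRemovals_alt]
  have hhalf : PySem.Int.floordiv (nums.length : Int) 2 = ((nums.length / 2 : Nat) : Int) := by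
    exact_mod_cast PySem.Int.floordiv_natCast nums.length 2
  rw [hhalf, PySem.List.slice_to_natCast, PySem.List.slice_from_natCast]
  set h := nums.length / 2 with hh
  set left := nums.take h with hleft
  set right := nums.drop h with hright
  have hlnn : ∀ a ∈ left, 0 ≤ a := fun a ha => h1 a (List.mem_of_mem_take ha)
  have hrnn : ∀ a ∈ right, 0 ≤ a := fun a ha => h1 a (List.mem_of_mem_drop ha)
  obtain ⟨hlnod, hlget⟩ := tblMain left hlnn
  obtain ⟨hrnod, hrget⟩ := tblMain right hrnn
  set fL := FFn (left.map Int.toNat) with hfL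
  set fR := FFn (right.map Int.toNat) with hfR
  obtain ⟨hb0, hub, hex⟩ := bestFold (minRemovalsTable right) (tN : Int) (minRemovalsTable left).items (-1)
  set best := (minRemovalsTable left).items.foldl (fun best p =>
      match (minRemovalsTable right).get? (PySem.Int.bxor (tN : Int) p.1) with
      | some c2 => if best < p.2 + c2 then p.2 + c2 else best
      | none => best) (-1 : Int) with hbest
  have hcombB : IsComb fL fR tN best := by
    constructor
    · intro x hfx hgx
      have hgl : (minRemovalsTable left).get? ((x : Nat) : Int) = some (fL x) := by
        rw [hlget, if_pos ⟨by positivity, by rwa [Int.toNat_natCast]⟩, Int.toNat_natCast]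
      have hmem := PySem.Dict.mem_items_of_get?_eq_some _ hgl
      have hgr : (minRemovalsTable right).get? (PySem.Int.bxor (tN : Int) ((x : Nat) : Int)) =
          some (fR (tN ^^^ x)) := by
        rw [PySem.Int.bxor_natCast, hrget,
          if_pos ⟨by positivity, by rwa [Int.toNat_natCast]⟩, Int.toNat_natCast]
      exact hub _ hmem _ hgr
    · rcases hex with h | ⟨p, hp, c2, hc2, he⟩
      · exact Or.inl h
      · right
        have hpg := PySem.Dict.get?_of_mem_items _ hp hlnod
        rw [hlget] at hpg
        split_ifs at hpg with hcond
        · obtain ⟨hp1, hp2⟩ := hcond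
          have hpval : p.2 = fL p.1.toNat := by injection hpg with h'; omega
          refine ⟨p.1.toNat, by omega, ?_, ?_⟩
          · have hxc : ((p.1.toNat : Nat) : Int) = p.1 := Int.toNat_of_nonneg hp1
            rw [← hxc, PySem.Int.bxor_natCast] at hc2
            rw [hrget] at hc2
            split_ifs at hc2 with hcond2
            · injection hc2 with h''
              rw [Int.toNat_natCast] at hcond2
              omega
          · have hxc : ((p.1.toNat : Nat) : Int) = p.1 := Int.toNat_of_nonneg hp1
            rw [← hxc, PySem.Int.bxor_natCast] at hc2
            rw [hrget] at hc2
            split_ifs at hc2 with hcond2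
            · injection hc2 with h''
              rw [Int.toNat_natCast] at hcond2 h''
              rw [he, hpval, ← h'']
  have hsplit : left ++ right = nums := List.take_append_drop h nums
  have hmap : (nums.map Int.toNat) = left.map Int.toNat ++ right.map Int.toNat := by
    rw [← hsplit, List.map_append]
  have hcombF : IsComb fL fR tN (FFn (nums.map Int.toNat) tN) := by
    have hiso := isComb_foldl (right.map Int.toNat) fL tN (FFn_ge _)
    rw [← hfR] at hiso
    have hfold : List.foldl stepF fL (right.map Int.toNat) tN = FFn (nums.map Int.toNat) tN := by
      rw [hmap]
      unfold FFn
      rw [List.foldl_append]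
      rfl
    rwa [hfold] at hiso
  have hbe : best = FFn (nums.map Int.toNat) tN := isComb_unique hcombB hcombF
  rw [hbe]

-- ===== VERDICT (by name: the statement is the Claim_ definition above) =====
theorem minRemovals_spec : Claim_equal_minRemovals := by
  intro nums target _ hpre
  unfold Spec_minRemovals
  rw [A_eval nums target hpre.1 hpre.2, B_eval nums target hpre.1 hpre.2]
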